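-- pv_equiv track=rewrite | github.com/Mwie1024/Extra-CoT | src/data/compressor/dataset_preparation/camel/camel_chunk_only_cot/gpt_chunk_camel_data.py | _bisect_in_spans
-- ===== SOURCE A (Python) =====
-- from typing import List, Tuple, Dict, Any, Optional
--
-- def _bisect_in_spans(pos: int, spans: List[Tuple[int,int]]) -> bool:
--     """
--     二分查找：当前位置 pos 是否落在任一 [a, b) 区间内？
--     要求 spans 已按起点排序，且互不重叠（我们在 get_all_math_spans 里已 merge）。
--     """
--     lo, hi = 0, len(spans)
--     while lo < hi:
--         mid = (lo + hi) // 2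
--         a, b = spans[mid]
--         if a <= pos < b:
--             return True
--         if pos < a:
--             hi = mid
--         else:
--             lo = mid + 1
--     return False
-- ===== SOURCE B (Python) =====
-- from typing import List, Tuple
--
-- def _bisect_in_spans(pos: int, spans: List[Tuple[int, int]]) -> bool:
--     """Recursive search on list slices: split at the middle span and recurse
--     on the left or right sub-list. Same branch decisions as the index-window
--     binary search, so it agrees on every input (sorted or not)."""
--     if not spans:
--         return False
--     mid = len(spans) // 2
--     a, b = spans[mid]
--     if a <= pos < b:
--         return True
--     if pos < a:
--         return _bisect_in_spans(pos, spans[:mid])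
--     return _bisect_in_spans(pos, spans[mid + 1:])
-- ===== Notes on version B (the rewrite author's own statement) =====
-- stated objective: alternative
-- what changed: Replaced the iterative lo/hi index-window binary search by a recursion that physically splits the list at its middle span and recurses on the left or right slice, eliminating index bookkeeping while making identical branch decisions.
import Mathlib
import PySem

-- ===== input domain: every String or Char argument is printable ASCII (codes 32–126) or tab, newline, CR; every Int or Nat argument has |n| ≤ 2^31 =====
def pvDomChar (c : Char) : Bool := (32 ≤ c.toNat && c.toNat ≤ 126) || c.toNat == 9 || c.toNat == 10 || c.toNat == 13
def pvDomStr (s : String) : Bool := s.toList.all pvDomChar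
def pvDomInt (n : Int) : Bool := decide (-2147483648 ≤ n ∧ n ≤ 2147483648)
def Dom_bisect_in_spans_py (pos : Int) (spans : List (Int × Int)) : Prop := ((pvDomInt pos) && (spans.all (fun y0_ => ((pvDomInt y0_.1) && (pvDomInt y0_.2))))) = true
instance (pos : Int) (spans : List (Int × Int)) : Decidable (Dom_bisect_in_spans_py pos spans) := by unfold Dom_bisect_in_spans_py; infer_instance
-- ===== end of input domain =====

-- B replaces the iterative lo/hi index-window binary search by a recursion that
-- slices the list at its middle span; same branch decisions, same result (alternative).

-- ===== PORT A =====
-- while lo < hi: …  — the loop body, recursing on the (lo, hi) window.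
-- spans[mid] is always in range here (0 ≤ lo ≤ mid < hi ≤ len spans), so getD is exact.
def pvLoopA (pos : Int) (spans : List (Int × Int)) (lo hi : Nat) : Bool :=
  if _h : lo < hi then
    let mid := (lo + hi) / 2
    let ab := spans.getD mid (0, 0)
    if ab.1 ≤ pos ∧ pos < ab.2 then true
    else if pos < ab.1 then pvLoopA pos spans lo mid
    else pvLoopA pos spans (mid + 1) hi
  else false
termination_by hi - lo
decreasing_by all_goals omega

def bisect_in_spans_py (pos : Int) (spans : List (Int × Int)) : Bool :=
  pvLoopA pos spans 0 spans.length

-- ===== PORT B =====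
-- spans[mid] with 0 ≤ mid < len spans, so getD is exact; spans[:mid] = take, spans[mid+1:] = drop.
def bisect_in_spans_py_alt (pos : Int) (spans : List (Int × Int)) : Bool :=
  if _h : spans = [] then false
  else
    let mid := spans.length / 2
    let ab := spans.getD mid (0, 0)
    if ab.1 ≤ pos ∧ pos < ab.2 then true
    else if pos < ab.1 then bisect_in_spans_py_alt pos (spans.take mid)
    else bisect_in_spans_py_alt pos (spans.drop (mid + 1))
termination_by spans.length
decreasing_by
  · have : spans.length ≠ 0 := fun h => _h (List.eq_nil_of_length_eq_zero h)
    simp [List.length_take]; omega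
  · have : spans.length ≠ 0 := fun h => _h (List.eq_nil_of_length_eq_zero h)
    simp [List.length_drop]; omega

-- ===== PRECONDITION & SPEC =====
def Spec_bisect_in_spans_py (pos : Int) (spans : List (Int × Int)) (out : Bool) : Prop := out = bisect_in_spans_py_alt pos spans
instance (pos : Int) (spans : List (Int × Int)) (out : Bool) : Decidable (Spec_bisect_in_spans_py pos spans out) := by unfold Spec_bisect_in_spans_py; infer_instance

-- ===== CLAIM (what is proved, stated in full; the proofs are below) =====
def Claim_equal_bisect_in_spans_py : Prop := ∀ (pos : Int) (spans : List (Int × Int)), Dom_bisect_in_spans_py pos spans → Spec_bisect_in_spans_py pos spans (bisect_in_spans_py pos spans)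

-- ===== LEMMAS AND PROOFS =====

-- ===== VERDICT (by name: the statement is the Claim_ definition above) =====
-- Key invariant: the index-window loop on [lo, hi) equals B's recursion on the
-- corresponding physical slice of the list.
theorem pvLoopA_eq_alt (pos : Int) (spans : List (Int × Int)) :
    ∀ n lo hi, hi - lo ≤ n → hi ≤ spans.length →
      pvLoopA pos spans lo hi = bisect_in_spans_py_alt pos ((spans.drop lo).take (hi - lo)) := by
  intro n
  induction n with
  | zero =>
    intro lo hi h1 h2
    rw [pvLoopA, bisect_in_spans_py_alt]
    have hlo : ¬ lo < hi := by omega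
    have : hi - lo = 0 := by omega
    simp [hlo, this]
  | succ n ih =>
    intro lo hi h1 h2
    by_cases hlo : lo < hi
    · have hw : ((spans.drop lo).take (hi - lo)).length = hi - lo := by
        simp [List.length_take, List.length_drop]; omega
      have hne : ((spans.drop lo).take (hi - lo)) ≠ [] := by
        intro h; rw [h] at hw; simp at hw; omega
      rw [pvLoopA, bisect_in_spans_py_alt]
      simp only [hlo, dif_pos, hne, dif_neg, not_false_iff]
      rw [hw]
      have hmid : (lo + hi) / 2 = lo + (hi - lo) / 2 := by omega
      have hml : (hi - lo) / 2 < hi - lo := by omega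
      have hget : ((spans.drop lo).take (hi - lo)).getD ((hi - lo) / 2) (0, 0)
          = spans.getD ((lo + hi) / 2) (0, 0) := by
        simp [List.getD, hml, List.getElem?_drop, hmid]
      rw [hget]
      have e1 : ((spans.drop lo).take (hi - lo)).take ((hi - lo) / 2)
          = (spans.drop lo).take ((lo + hi) / 2 - lo) := by
        have i0 : min ((hi - lo) / 2) (hi - lo) = (lo + hi) / 2 - lo := by omega
        rw [List.take_take, i0]
      have e2 : ((spans.drop lo).take (hi - lo)).drop ((hi - lo) / 2 + 1)
          = (spans.drop ((lo + hi) / 2 + 1)).take (hi - ((lo + hi) / 2 + 1)) := by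
        have i1 : hi - lo - ((hi - lo) / 2 + 1) = hi - ((lo + hi) / 2 + 1) := by omega
        have i2 : lo + ((hi - lo) / 2 + 1) = (lo + hi) / 2 + 1 := by omega
        rw [List.drop_take, List.drop_drop, i1, i2]
      rw [e1, e2, ← ih lo ((lo + hi) / 2) (by omega) (by omega),
        ← ih ((lo + hi) / 2 + 1) hi (by omega) (by omega)]
    · have h0 : hi - lo = 0 := by omega
      rw [pvLoopA, bisect_in_spans_py_alt]
      simp [hlo, h0]

-- ===== VERDICT =====
theorem bisect_in_spans_py_spec : Claim_equal_bisect_in_spans_py := by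
  intro pos spans _
  unfold Spec_bisect_in_spans_py bisect_in_spans_py
  have := pvLoopA_eq_alt pos spans spans.length 0 spans.length (by omega) (le_refl _)
  simpa using this
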